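-- pv_equiv track=rewrite | github.com/kjh03160/Algorithm_Basic | practice/DFS_BFS/Garry_Mendering_17471.py | bfs
-- ===== SOURCE A (Python) =====
-- from collections import deque
--
-- def bfs(index, G, cands, cost):
--     q = deque()
--     q.append((index, cost[index - 1]))
--     visited = set()
--     visited.add(index)
--     p = 0
--     while q:
--         node, x = q.popleft()
--         p += x
--         for edge in G[node]:
--             if edge not in visited and edge in cands:
--                 visited.add(edge)
--                 q.append((edge, cost[edge - 1]))
--
--     if visited == cands:
--         return p
--     return -1
-- ===== SOURCE B (Python) =====
-- def bfs(index, G, cands, cost):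
--     # Fixed-point saturation, no frontier: 'seen' maps each reached node to its
--     # cost (looked up when the node is first seen); sweep all seen nodes'
--     # adjacency lists repeatedly until a full sweep adds nothing.
--     seen = {index: cost[index - 1]}
--     changed = True
--     while changed:
--         changed = False
--         for u in list(seen):
--             for e in G[u]:
--                 if e in cands and e not in seen:
--                     seen[e] = cost[e - 1]
--                     changed = True
--     if seen.keys() != cands:
--         return -1
--     return sum(seen.values())
-- ===== Notes on version B (the rewrite author's own statement) =====
-- stated objective: alternative
-- what changed: A runs a FIFO BFS with a frontier queue of (node, cost) pairs accumulating the total inside the traversal; B keeps no frontier at all: it saturates a node-to-cost dict by repeated full sweeps over the seen nodes' adjacency lists until a sweep adds nothing, then compares the key set and sums the dict's values.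
import Mathlib
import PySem

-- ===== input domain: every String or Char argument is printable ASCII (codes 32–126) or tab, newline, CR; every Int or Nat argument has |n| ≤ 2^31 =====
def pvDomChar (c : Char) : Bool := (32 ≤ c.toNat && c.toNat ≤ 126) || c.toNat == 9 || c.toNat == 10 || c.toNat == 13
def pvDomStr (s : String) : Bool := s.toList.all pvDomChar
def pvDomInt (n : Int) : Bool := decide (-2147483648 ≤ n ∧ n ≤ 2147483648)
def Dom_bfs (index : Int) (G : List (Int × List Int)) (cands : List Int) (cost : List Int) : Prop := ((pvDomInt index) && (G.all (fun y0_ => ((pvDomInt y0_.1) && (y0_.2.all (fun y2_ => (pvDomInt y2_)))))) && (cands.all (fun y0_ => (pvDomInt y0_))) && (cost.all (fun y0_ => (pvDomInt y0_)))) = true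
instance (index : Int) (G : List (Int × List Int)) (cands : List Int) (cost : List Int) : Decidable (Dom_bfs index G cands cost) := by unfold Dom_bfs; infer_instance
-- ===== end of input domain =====

-- B replaces A's fused BFS (FIFO frontier of (node, cost) pairs plus a running total) by a
-- frontier-free fixed-point saturation over a node-to-cost dict: full sweeps over the seen
-- nodes' adjacency lists until a sweep adds nothing, then one sum of the dict's values.

-- helpers shared by both ports (both Pythons write cost[v - 1] and look up G[node] / G[u])
def costOf (cost : List Int) (v : Int) : Int := PySem.List.pyGetD cost (v - 1) 0
def adjOf (G : List (Int × List Int)) (v : Int) : List Int := (PySem.Dict.mk G).getD v []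

-- ===== PORT A =====
-- A's while-loop; the fuel argument only makes the recursion total (cands.length + 2 always suffices: every
-- enqueued node beyond the root is a fresh member of cands, so the loop pops at most cands.length + 1 times).
def bfsLoop (G : List (Int × List Int)) (cands cost : List Int) :
    Nat → List (Int × Int) → PySem.Set Int → Int → PySem.Set Int × Int
  | 0, _, vis, p => (vis, p)
  | _ + 1, [], vis, p => (vis, p)
  | f + 1, (node, x) :: q, vis, p =>
      let st := (adjOf G node).foldl
        (fun (st : List (Int × Int) × PySem.Set Int) edge =>
          if edge ∉ st.2 ∧ edge ∈ cands then
            (st.1 ++ [(edge, costOf cost edge)], PySem.Set.add st.2 edge)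
          else st) (q, vis)
      bfsLoop G cands cost f st.1 st.2 (p + x)

def bfs (index : Int) (G : List (Int × List Int)) (cands : List Int) (cost : List Int) : Int :=
  let r := bfsLoop G cands cost (cands.length + 2)
    [(index, costOf cost index)] (PySem.Set.add PySem.Set.empty index) 0
  if PySem.Set.equal r.1 cands then r.2 else -1

-- ===== PORT B =====
-- one full sweep 'for u in list(seen): for e in G[u]: …' of B's saturation, threading (seen, changed);
-- the outer fold runs over the snapshot st0.1.keys (= Python's list(seen)) while the dict grows
def satPass (cands cost : List Int) (G : List (Int × List Int)) (st0 : PySem.Dict Int Int × Bool) :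
    PySem.Dict Int Int × Bool :=
  st0.1.keys.foldl (fun st u =>
    (adjOf G u).foldl (fun (st2 : PySem.Dict Int Int × Bool) e =>
      if e ∈ cands ∧ ¬ st2.1.contains e then (st2.1.insert e (costOf cost e), true) else st2) st) st0

-- B's 'while changed' loop; fuel only totalizes it (cands.length + 1 passes always suffice:
-- every pass but the last adds a fresh member of cands).
def satLoop (cands cost : List Int) (G : List (Int × List Int)) :
    Nat → PySem.Dict Int Int → PySem.Dict Int Int
  | 0, d => d
  | f + 1, d =>
      let st := satPass cands cost G (d, false)
      if st.2 then satLoop cands cost G f st.1 else st.1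

def bfs_alt (index : Int) (G : List (Int × List Int)) (cands : List Int) (cost : List Int) : Int :=
  let d := satLoop cands cost G (cands.length + 1)
    (PySem.Dict.empty.insert index (costOf cost index))
  if ¬ PySem.Set.equal d.keys cands then -1
  else d.values.sum

-- ===== PRECONDITION & SPEC =====
-- Pre_ is exactly the inputs on which Python A returns normally: A raises (KeyError / IndexError)
-- iff some node it reaches — index, or a candidate reachable from it through candidate edges — is
-- missing from G's keys or has an invalid index v-1 into cost.  Stated closed-form: there is a set R
-- of nodes (a sublist of index :: cands deduped) containing index, closed under candidate edges, all
-- of whose members are keys of G with a valid cost index (such an R exists iff A's visited set is all good).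
def Pre_bfs (index : Int) (G : List (Int × List Int)) (cands : List Int) (cost : List Int) : Prop :=
  ∃ R ∈ (index :: PySem.List.dedup cands).sublists,
    index ∈ R ∧
    (∀ u ∈ R, ∀ e ∈ adjOf G u, e ∈ cands → e ∈ R) ∧
    (∀ v ∈ R, v ∈ G.map Prod.fst ∧ PySem.Raise.InRange cost.length (v - 1))
instance (index : Int) (G : List (Int × List Int)) (cands : List Int) (cost : List Int) : Decidable (Pre_bfs index G cands cost) := by unfold Pre_bfs; infer_instance

def pvWitness_bfs : Int × (List (Int × List Int)) × List Int × List Int :=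
  (1, [(1, [2]), (2, [1])], [1, 2], [3, 4])

def Spec_bfs (index : Int) (G : List (Int × List Int)) (cands : List Int) (cost : List Int) (out : Int) : Prop := out = bfs_alt index G cands cost
instance (index : Int) (G : List (Int × List Int)) (cands : List Int) (cost : List Int) (out : Int) : Decidable (Spec_bfs index G cands cost out) := by unfold Spec_bfs; infer_instance

-- ===== CLAIM (what is proved, stated in full; the proofs are below) =====
def Claim_equal_bfs : Prop := ∀ (index : Int) (G : List (Int × List Int)) (cands : List Int) (cost : List Int), Dom_bfs index G cands cost → Pre_bfs index G cands cost → Spec_bfs index G cands cost (bfs index G cands cost)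

-- ===== LEMMAS AND PROOFS =====

-- remaining budget of fresh candidates
def Ufun (cands vis : List Int) : Nat :=
  ((PySem.List.dedup cands).filter (fun v => decide (v ∉ vis))).length

lemma Ufun_append_singleton (cands vis : List Int) (e : Int) (hc : e ∈ cands) (hv : e ∉ vis) :
    Ufun cands (vis ++ [e]) + 1 = Ufun cands vis := by
  unfold Ufun
  have h1 : ((PySem.List.dedup cands).filter (fun v => decide (v ∉ vis ++ [e])))
      = ((PySem.List.dedup cands).filter (fun v => decide (v ∉ vis))).filter (fun v => decide (v ≠ e)) := by
    rw [List.filter_filter]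
    apply List.filter_congr
    intro v _
    simp [List.mem_append]
    rw [Bool.and_comm]
  rw [h1]
  set m := (PySem.List.dedup cands).filter (fun v => decide (v ∉ vis)) with hm
  have hnd : m.Nodup := List.Nodup.filter _ (PySem.List.nodup_dedup cands)
  have hem : e ∈ m := by
    rw [hm]; simp [List.mem_filter, hc, hv, PySem.List.dedup]
  have h2 : m.filter (fun v => decide (v ≠ e)) = m.erase e := by
    rw [List.Nodup.erase_eq_filter hnd]
    apply List.filter_congr
    intro v _
    simp [bne]
    rfl
  rw [h2, List.length_erase_of_mem hem]
  have := List.length_pos_of_mem hem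
  omega

lemma Ufun_append (cands vis : List Int) (new : List Int) (hn : new.Nodup)
    (h : ∀ e ∈ new, e ∈ cands ∧ e ∉ vis) :
    Ufun cands (vis ++ new) + new.length = Ufun cands vis := by
  induction new generalizing vis with
  | nil => simp
  | cons e rest ih =>
      have he := h e (List.mem_cons_self ..)
      have hrest : ∀ x ∈ rest, x ∈ cands ∧ x ∉ vis ++ [e] := by
        intro x hx
        obtain ⟨h1, h2⟩ := h x (List.mem_cons_of_mem _ hx)
        refine ⟨h1, ?_⟩
        simp only [List.mem_append, List.mem_singleton]
        rintro (h3 | rfl)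
        · exact h2 h3
        · exact (List.nodup_cons.mp hn).1 hx
      have hstep := Ufun_append_singleton cands vis e he.1 he.2
      have hih := ih (vis ++ [e]) (List.nodup_cons.mp hn).2 hrest
      rw [List.append_assoc] at hih
      simp only [List.singleton_append] at hih
      simp only [List.length_cons]
      omega

-- A's inner for-loop
lemma afold (cands cost : List Int) (edges : List Int) (q : List (Int × Int)) (vis : PySem.Set Int) :
    ∃ new : List Int,
      (edges.foldl
        (fun (st : List (Int × Int) × PySem.Set Int) edge =>
          if edge ∉ st.2 ∧ edge ∈ cands then
            (st.1 ++ [(edge, costOf cost edge)], PySem.Set.add st.2 edge)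
          else st) (q, vis))
        = (q ++ new.map (fun e => (e, costOf cost e)), vis ++ new)
      ∧ new.Nodup
      ∧ (∀ e ∈ new, e ∈ edges ∧ e ∈ cands ∧ e ∉ vis)
      ∧ (∀ e ∈ edges, e ∈ cands → e ∈ vis ∨ e ∈ new) := by
  induction edges generalizing q vis with
  | nil => exact ⟨[], by simp, List.nodup_nil, by simp, by simp⟩
  | cons e rest ih =>
      simp only [List.foldl_cons]
      by_cases h : e ∉ vis ∧ e ∈ cands
      · rw [if_pos h, PySem.Set.add_of_not_mem h.1]
        obtain ⟨new', hfold, hnd, hprop, hcov⟩ :=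
          ih (q ++ [(e, costOf cost e)]) (vis ++ [e])
        refine ⟨e :: new', ?_, ?_, ?_, ?_⟩
        · rw [hfold]
          simp [List.append_assoc]
        · refine List.nodup_cons.mpr ⟨?_, hnd⟩
          intro hmem
          exact (hprop e hmem).2.2 (by simp)
        · intro x hmemx
          rcases List.mem_cons.mp hmemx with rfl | hx
          · exact ⟨List.mem_cons_self .., h.2, h.1⟩
          · obtain ⟨h1, h2, h3⟩ := hprop x hx
            refine ⟨List.mem_cons_of_mem _ h1, h2, ?_⟩
            intro hv
            exact h3 (by simp [hv])
        · intro x hmemx hc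
          rcases List.mem_cons.mp hmemx with rfl | hx
          · right; exact List.mem_cons_self ..
          · rcases hcov x hx hc with h1 | h1
            · rcases List.mem_append.mp h1 with h2 | h2
              · exact Or.inl h2
              · right; simp at h2; simp [h2]
            · right; exact List.mem_cons_of_mem _ h1
      · rw [if_neg h]
        obtain ⟨new', hfold, hnd, hprop, hcov⟩ := ih q vis
        refine ⟨new', hfold, hnd, ?_, ?_⟩
        · intro x hx
          obtain ⟨h1, h2, h3⟩ := hprop x hx
          exact ⟨List.mem_cons_of_mem _ h1, h2, h3⟩
        · intro x hmemx hc
          rcases List.mem_cons.mp hmemx with rfl | hx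
          · left
            by_contra hv
            exact h ⟨hv, hc⟩
          · exact hcov x hx hc

-- A's loop invariant
lemma aloop (G : List (Int × List Int)) (cands cost : List Int) (f : Nat)
    (q : List (Int × Int)) (vis : PySem.Set Int) (p : Int)
    (hfuel : Ufun cands vis + q.length ≤ f)
    (hq : ∀ pr ∈ q, pr.1 ∈ vis ∧ pr.2 = costOf cost pr.1)
    (hqn : (q.map Prod.fst).Nodup)
    (hvn : vis.Nodup)
    (hsum : p + (q.map Prod.snd).sum = (vis.map (costOf cost)).sum)
    (hcl : ∀ v ∈ vis, v ∉ q.map Prod.fst → ∀ e ∈ adjOf G v, e ∈ cands → e ∈ vis) :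
    (bfsLoop G cands cost f q vis p).1.Nodup
    ∧ (∀ v ∈ vis, v ∈ (bfsLoop G cands cost f q vis p).1)
    ∧ (∀ u ∈ (bfsLoop G cands cost f q vis p).1, ∀ e ∈ adjOf G u, e ∈ cands →
        e ∈ (bfsLoop G cands cost f q vis p).1)
    ∧ (∀ S : Int → Prop, (∀ v ∈ vis, S v) → (∀ u, S u → ∀ e ∈ adjOf G u, e ∈ cands → S e) →
        ∀ v ∈ (bfsLoop G cands cost f q vis p).1, S v)
    ∧ (bfsLoop G cands cost f q vis p).2
        = ((bfsLoop G cands cost f q vis p).1.map (costOf cost)).sum := by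
  induction f generalizing q vis p with
  | zero =>
      have hq0 : q = [] := List.eq_nil_of_length_eq_zero (by omega)
      subst hq0
      simp only [bfsLoop]
      refine ⟨hvn, fun v hv => hv, ?_, fun S hS _ v hv => hS v hv, ?_⟩
      · intro u hu e he hec
        exact hcl u hu (by simp) e he hec
      · simpa using hsum
  | succ f ih =>
      match q with
      | [] =>
          simp only [bfsLoop]
          refine ⟨hvn, fun v hv => hv, ?_, fun S hS _ v hv => hS v hv, ?_⟩
          · intro u hu e he hec
            exact hcl u hu (by simp) e he hec
          · simpa using hsum
      | (node, x) :: rest =>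
          obtain ⟨new, hfold, hnd, hprop, hcov⟩ := afold cands cost (adjOf G node) rest vis
          have hnode : node ∈ vis ∧ x = costOf cost node := hq _ (List.mem_cons_self ..)
          have hdisj : ∀ e ∈ new, e ∉ vis := fun e he => (hprop e he).2.2
          have hUf : Ufun cands (vis ++ new) + new.length = Ufun cands vis :=
            Ufun_append cands vis new hnd (fun e he => ⟨(hprop e he).2.1, (hprop e he).2.2⟩)
          simp only [bfsLoop, hfold]
          have hmapfst : (rest ++ new.map (fun e => (e, costOf cost e))).map Prod.fst
              = rest.map Prod.fst ++ new := by
            simp [Function.comp_def]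
          have hres := ih (rest ++ new.map (fun e => (e, costOf cost e))) (vis ++ new) (p + x)
            (by
              simp only [List.length_append, List.length_map]
              simp only [List.length_cons] at hfuel
              omega)
            (by
              intro pr hpr
              rcases List.mem_append.mp hpr with h1 | h1
              · obtain ⟨h2, h3⟩ := hq pr (List.mem_cons_of_mem _ h1)
                exact ⟨List.mem_append.mpr (Or.inl h2), h3⟩
              · obtain ⟨e, he, rfl⟩ := List.mem_map.mp h1
                exact ⟨List.mem_append.mpr (Or.inr he), rfl⟩)
            (by
              rw [hmapfst]
              refine List.Nodup.append ?_ hnd ?_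
              · exact (List.nodup_cons.mp (by simpa using hqn)).2
              · intro a ha hb
                obtain ⟨pr, hpr, rfl⟩ := List.mem_map.mp ha
                exact hdisj _ hb (hq pr (List.mem_cons_of_mem _ hpr)).1)
            (List.Nodup.append hvn hnd (fun a ha hb => hdisj a hb ha))
            (by
              simp only [List.map_append, List.sum_append, List.map_map, List.map_cons,
                List.sum_cons] at hsum ⊢
              have hsnd : (new.map (Prod.snd ∘ fun e => (e, costOf cost e))).sum
                  = (new.map (costOf cost)).sum := by
                simp [Function.comp_def]
              rw [hsnd]
              omega)
            (by
              intro v hv hnq e he hec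
              rw [hmapfst] at hnq
              rcases List.mem_append.mp hv with hvv | hvnew
              · by_cases hvn' : v = node
                · subst hvn'
                  rcases hcov e he hec with h1 | h1
                  · exact List.mem_append.mpr (Or.inl h1)
                  · exact List.mem_append.mpr (Or.inr h1)
                · have hvrest : v ∉ rest.map Prod.fst :=
                    fun h => hnq (List.mem_append.mpr (Or.inl h))
                  have hvq : v ∉ ((node, x) :: rest).map Prod.fst := by
                    simp only [List.map_cons, List.mem_cons]
                    rintro (h1 | h1)
                    · exact hvn' h1
                    · exact hvrest h1
                  exact List.mem_append.mpr (Or.inl (hcl v hvv hvq e he hec))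
              · exact absurd (List.mem_append.mpr (Or.inr hvnew)) hnq)
          obtain ⟨c1, c2, c3, c4, c5⟩ := hres
          refine ⟨c1, ?_, c3, ?_, c5⟩
          · intro v hv
            exact c2 v (List.mem_append.mpr (Or.inl hv))
          · intro S hS hSc v hv
            refine c4 S ?_ hSc v hv
            intro w hw
            rcases List.mem_append.mp hw with h1 | h1
            · exact hS w h1
            · obtain ⟨he, hec, _⟩ := hprop w h1
              exact hSc node (hS node hnode.1) w he hec

-- B's dict of reached nodes, abstracted: the nodes seen so far, each paired with its cost
def mkD (cost : List Int) (V : List Int) : PySem.Dict Int Int :=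
  PySem.Dict.mk (V.map (fun v => (v, costOf cost v)))

lemma keysD (cost V : List Int) : (mkD cost V).keys = V := by
  simp [mkD, PySem.Dict.keys, Function.comp_def]

lemma valuesD (cost V : List Int) : (mkD cost V).values = V.map (costOf cost) := by
  simp [mkD, PySem.Dict.values]

lemma containsD (cost : List Int) (V : List Int) (e : Int) :
    (mkD cost V).contains e = decide (e ∈ V) := by
  rw [PySem.Dict.contains_eq_decide_mem_keys (d := mkD cost V) (k := e), keysD]

lemma insertD (cost : List Int) (V : List Int) (e : Int) (he : e ∉ V) :
    (mkD cost V).insert e (costOf cost e) = mkD cost (V ++ [e]) := by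
  apply PySem.Dict.ext
  rw [PySem.Dict.items_insert, containsD]
  simp [mkD, he]

-- B's inner for-loop (edges of one snapshot node u)
lemma binner (cands cost : List Int) (edges : List Int) (V : List Int) (ch : Bool) :
    ∃ new : List Int,
      (edges.foldl
        (fun (st2 : PySem.Dict Int Int × Bool) e =>
          if e ∈ cands ∧ ¬ st2.1.contains e then (st2.1.insert e (costOf cost e), true) else st2)
        (mkD cost V, ch))
        = (mkD cost (V ++ new), if new = [] then ch else true)
      ∧ new.Nodup
      ∧ (∀ e ∈ new, e ∈ edges ∧ e ∈ cands ∧ e ∉ V)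
      ∧ (∀ e ∈ edges, e ∈ cands → e ∈ V ∨ e ∈ new) := by
  induction edges generalizing V ch with
  | nil => exact ⟨[], by simp, List.nodup_nil, by simp, by simp⟩
  | cons e rest ih =>
      simp only [List.foldl_cons]
      by_cases h : e ∈ cands ∧ e ∉ V
      · rw [if_pos (by simpa [containsD] using h), insertD cost V e h.2]
        obtain ⟨new', hfold, hnd, hprop, hcov⟩ := ih (V ++ [e]) true
        refine ⟨e :: new', ?_, ?_, ?_, ?_⟩
        · rw [hfold]
          simp [List.append_assoc]
        · refine List.nodup_cons.mpr ⟨?_, hnd⟩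
          intro hmem
          exact (hprop e hmem).2.2 (by simp)
        · intro x hmemx
          rcases List.mem_cons.mp hmemx with rfl | hx
          · exact ⟨List.mem_cons_self .., h.1, h.2⟩
          · obtain ⟨h1, h2, h3⟩ := hprop x hx
            refine ⟨List.mem_cons_of_mem _ h1, h2, ?_⟩
            intro hv
            exact h3 (by simp [hv])
        · intro x hmemx hc
          rcases List.mem_cons.mp hmemx with rfl | hx
          · right; exact List.mem_cons_self ..
          · rcases hcov x hx hc with h1 | h1
            · rcases List.mem_append.mp h1 with h2 | h2
              · exact Or.inl h2
              · right; simp at h2; simp [h2]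
            · right; exact List.mem_cons_of_mem _ h1
      · rw [if_neg (by simpa [containsD] using h)]
        obtain ⟨new', hfold, hnd, hprop, hcov⟩ := ih V ch
        refine ⟨new', hfold, hnd, ?_, ?_⟩
        · intro x hx
          obtain ⟨h1, h2, h3⟩ := hprop x hx
          exact ⟨List.mem_cons_of_mem _ h1, h2, h3⟩
        · intro x hmemx hc
          rcases List.mem_cons.mp hmemx with rfl | hx
          · by_cases hv : x ∈ V
            · exact Or.inl hv
            · exact absurd ⟨hc, hv⟩ h
          · exact hcov x hx hc

-- the outer fold of one sweep, over an arbitrary snapshot list us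
lemma bpassAux (cands cost : List Int) (G : List (Int × List Int)) (us : List Int) :
    ∀ (V : List Int) (ch : Bool),
    ∃ new : List Int,
      (us.foldl (fun st u =>
        (adjOf G u).foldl (fun (st2 : PySem.Dict Int Int × Bool) e =>
          if e ∈ cands ∧ ¬ st2.1.contains e then (st2.1.insert e (costOf cost e), true) else st2) st)
        (mkD cost V, ch))
        = (mkD cost (V ++ new), if new = [] then ch else true)
      ∧ new.Nodup
      ∧ (∀ e ∈ new, e ∈ cands ∧ e ∉ V)
      ∧ (new = [] → ∀ u ∈ us, ∀ e ∈ adjOf G u, e ∈ cands → e ∈ V)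
      ∧ (∀ S : Int → Prop, (∀ v ∈ V, S v) → (∀ u ∈ us, S u) →
          (∀ u, S u → ∀ e ∈ adjOf G u, e ∈ cands → S e) → ∀ v ∈ V ++ new, S v) := by
  induction us with
  | nil =>
      intro V ch
      exact ⟨[], by simp, List.nodup_nil, by simp, by simp,
        fun S hS _ _ v hv => hS v (by simpa using hv)⟩
  | cons u rest ih =>
      intro V ch
      simp only [List.foldl_cons]
      obtain ⟨n1, hf1, hnd1, hpr1, hcov1⟩ := binner cands cost (adjOf G u) V ch
      rw [hf1]
      obtain ⟨n2, hf2, hnd2, hpr2, hcl2, hmin2⟩ := ih (V ++ n1) (if n1 = [] then ch else true)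
      refine ⟨n1 ++ n2, ?_, ?_, ?_, ?_, ?_⟩
      · rw [hf2, List.append_assoc]
        congr 1
        by_cases h1 : n1 = [] <;> by_cases h2 : n2 = [] <;>
          simp [h1, h2, List.append_eq_nil_iff]
      · refine List.Nodup.append hnd1 hnd2 ?_
        intro a ha hb
        exact (hpr2 a hb).2 (List.mem_append.mpr (Or.inr ha))
      · intro e he
        rcases List.mem_append.mp he with h1 | h1
        · exact ⟨(hpr1 e h1).2.1, (hpr1 e h1).2.2⟩
        · obtain ⟨h2, h3⟩ := hpr2 e h1
          exact ⟨h2, fun hv => h3 (List.mem_append.mpr (Or.inl hv))⟩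
      · intro hnil q hq e he hec
        obtain ⟨hn1, hn2⟩ := List.append_eq_nil_iff.mp hnil
        subst hn1
        rcases List.mem_cons.mp hq with rfl | hq'
        · rcases hcov1 e he hec with h1 | h1
          · exact h1
          · simp at h1
        · have := hcl2 hn2 q hq' e he hec
          simpa using this
      · intro S hS hus hScl v hv
        have hS1 : ∀ w ∈ V ++ n1, S w := by
          intro w hw
          rcases List.mem_append.mp hw with h1 | h1
          · exact hS w h1
          · obtain ⟨he, hec, _⟩ := hpr1 w h1
            exact hScl u (hus u (List.mem_cons_self ..)) w he hec
        have := hmin2 S hS1 (fun q hq => hus q (List.mem_cons_of_mem _ hq)) hScl v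
        rw [List.append_assoc] at this
        exact this hv

-- B's outer while-loop invariant
lemma bloop (G : List (Int × List Int)) (cands cost : List Int) (f : Nat) (V : List Int)
    (hfuel : Ufun cands V + 1 ≤ f) (hnd : V.Nodup) :
    ∃ W : List Int,
      satLoop cands cost G f (mkD cost V) = mkD cost W
      ∧ W.Nodup
      ∧ (∀ v ∈ V, v ∈ W)
      ∧ (∀ u ∈ W, ∀ e ∈ adjOf G u, e ∈ cands → e ∈ W)
      ∧ (∀ S : Int → Prop, (∀ v ∈ V, S v) →
          (∀ u, S u → ∀ e ∈ adjOf G u, e ∈ cands → S e) → ∀ v ∈ W, S v) := by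
  induction f generalizing V with
  | zero => omega
  | succ f ih =>
      have hpass := bpassAux cands cost G ((mkD cost V).keys) V false
      rw [keysD] at hpass
      obtain ⟨new, hpassEq, hndnew, hprop, hclosed, hmin⟩ := hpass
      simp only [satLoop, satPass, keysD, hpassEq]
      rcases Decidable.em (new = []) with rfl | hne
      · rw [if_neg (by simp), List.append_nil]
        exact ⟨V, rfl, hnd, fun v hv => hv, hclosed rfl,
          fun S hS _ v hv => hS v hv⟩
      · rw [if_pos (by simp [hne])]
        have hUf : Ufun cands (V ++ new) + new.length = Ufun cands V :=
          Ufun_append cands V new hndnew hprop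
        have hlen : 1 ≤ new.length := List.length_pos_of_ne_nil hne
        have hndV : (V ++ new).Nodup :=
          List.Nodup.append hnd hndnew (fun a ha hb => (hprop a hb).2 ha)
        obtain ⟨W, hW, c1, c2, c3, c4⟩ := ih (V ++ new) (by omega) hndV
        refine ⟨W, hW, c1, ?_, c3, ?_⟩
        · intro v hv
          exact c2 v (List.mem_append.mpr (Or.inl hv))
        · intro S hS hScl v hv
          refine c4 S ?_ hScl v hv
          intro w hw
          exact hmin S hS hS hScl w hw

-- ===== VERDICT (by name: the statement is the Claim_ definition above) =====
theorem bfs_spec : Claim_equal_bfs := by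
  intro index G cands cost _hdom _hpre
  unfold Spec_bfs bfs bfs_alt
  have hvis0 : PySem.Set.add PySem.Set.empty index = [index] := rfl
  rw [hvis0]
  have hd0 : PySem.Dict.empty.insert index (costOf cost index) = mkD cost [index] := rfl
  rw [hd0]
  have hU : Ufun cands [index] ≤ cands.length := by
    refine le_trans (List.length_filter_le _ _) ?_
    simpa using PySem.Set.length_ofList_le cands
  obtain ⟨an, asub, acl, amin, asum⟩ := aloop G cands cost (cands.length + 2)
    [(index, costOf cost index)] [index] 0
    (by simp only [List.length_cons, List.length_nil]; omega)
    (by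
      intro pr hpr
      rcases List.mem_cons.mp hpr with rfl | h
      · exact ⟨List.mem_cons_self .., rfl⟩
      · cases h)
    (by simp)
    (by simp)
    (by simp)
    (by
      intro v hv hnv
      exact absurd hv hnv)
  obtain ⟨W, hW, bn, bsub, bcl, bmin⟩ := bloop G cands cost (cands.length + 1) [index]
    (by omega)
    (by simp)
  set VA := (bfsLoop G cands cost (cands.length + 2)
    [(index, costOf cost index)] [index] 0).1 with hVA
  have hAB : ∀ v, v ∈ VA ↔ v ∈ W := by
    intro v
    constructor
    · intro h
      refine amin (fun z => z ∈ W) ?_ bcl v h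
      intro w hw
      rcases List.mem_cons.mp hw with rfl | h'
      · exact bsub w (List.mem_cons_self ..)
      · cases h'
    · intro h
      refine bmin (fun z => z ∈ VA) ?_ acl v h
      intro w hw
      rcases List.mem_cons.mp hw with rfl | h'
      · exact asub w (List.mem_cons_self ..)
      · cases h'
  have hperm : VA.Perm W := (List.perm_ext_iff_of_nodup an bn).mpr hAB
  have hequal : PySem.Set.equal VA cands = PySem.Set.equal W cands := by
    rw [Bool.eq_iff_iff, PySem.Set.equal_iff, PySem.Set.equal_iff]
    constructor
    · intro h x
      rw [← hAB x]
      exact h x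
    · intro h x
      rw [hAB x]
      exact h x
  have hsums : (VA.map (costOf cost)).sum = (W.map (costOf cost)).sum :=
    (hperm.map (costOf cost)).sum_eq
  simp only [← hVA, hW, keysD, valuesD]
  rw [hequal, asum, hsums]
  by_cases h : PySem.Set.equal W cands = true
  · simp [h]
  · simp [h]
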